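-- pv_equiv track=rewrite | github.com/hassanmzia/AI-GovCon-System | backend/apps/proposals/services/workspace_creator.py | _criterion_matches_volume
-- ===== SOURCE A (Python) =====
-- def _criterion_matches_volume(criterion_name: str, volume_name: str) -> bool:
--     """Check if an evaluation criterion relates to a given volume."""
--     criterion_lower = criterion_name.lower()
--     volume_lower = volume_name.lower()
--     # Match on key terms
--     keyword_map = {
--         "technical": ["technical", "approach", "solution"],
--         "management": ["management", "staffing", "personnel"],
--         "past performance": ["past performance", "experience", "reference"],
--         "price": ["price", "cost", "pricing"],
--     }
--     for category, keywords in keyword_map.items():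
--         if any(kw in volume_lower for kw in keywords):
--             if any(kw in criterion_lower for kw in keywords):
--                 return True
--     return False
-- ===== SOURCE B (Python) =====
-- _KW_BITS = [
--     ("technical", 1), ("approach", 1), ("solution", 1),
--     ("management", 2), ("staffing", 2), ("personnel", 2),
--     ("past performance", 4), ("experience", 4), ("reference", 4),
--     ("price", 8), ("cost", 8), ("pricing", 8),
-- ]
--
--
-- def _fingerprint(s: str) -> int:
--     """Bitmask of keyword categories whose keywords occur in s (case-insensitive)."""
--     s = s.lower()
--     m = 0
--     for kw, bit in _KW_BITS:
--         if kw in s: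
--             m |= bit
--     return m
--
--
-- def _criterion_matches_volume(criterion_name: str, volume_name: str) -> bool:
--     """Check if an evaluation criterion relates to a given volume."""
--     return _fingerprint(volume_name) & _fingerprint(criterion_name) != 0
-- ===== Notes on version B (the rewrite author's own statement) =====
-- stated objective: alternative
-- what changed: Replaces the per-category loop with nested any() tests and early return by a flat inverted keyword-to-category-bit list: one single pass per string ORs category bits into an integer fingerprint, and the answer is whether the two fingerprints share a bit (bitwise AND nonzero).
import Mathlib
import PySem

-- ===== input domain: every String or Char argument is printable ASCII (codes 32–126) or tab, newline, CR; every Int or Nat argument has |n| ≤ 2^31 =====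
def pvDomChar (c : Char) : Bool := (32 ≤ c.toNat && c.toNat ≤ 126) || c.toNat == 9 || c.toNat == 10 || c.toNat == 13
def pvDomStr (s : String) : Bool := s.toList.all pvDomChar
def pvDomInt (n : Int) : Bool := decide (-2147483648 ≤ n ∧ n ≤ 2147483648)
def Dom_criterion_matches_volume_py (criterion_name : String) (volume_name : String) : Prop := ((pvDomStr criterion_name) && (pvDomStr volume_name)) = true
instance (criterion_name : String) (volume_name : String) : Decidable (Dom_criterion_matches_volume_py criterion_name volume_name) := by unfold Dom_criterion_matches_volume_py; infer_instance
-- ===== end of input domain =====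

-- B replaces A's per-category loop (nested any() tests, early return) by a flat inverted
-- keyword->category-bit list: one pass per string ORs bits into an integer fingerprint and
-- the answer is whether the two fingerprints share a bit (objective: alternative).


-- ===== PORT A =====
-- the module's keyword map, as A iterates it
def pvKeywordMap : List (String × List String) :=
  [("technical", ["technical", "approach", "solution"]),
   ("management", ["management", "staffing", "personnel"]),
   ("past performance", ["past performance", "experience", "reference"]),
   ("price", ["price", "cost", "pricing"])]

-- any(kw in s for kw in kws)
def pvAnyKwIn (s : String) (kws : List String) : Bool :=
  kws.any (fun kw => PySem.Str.isIn kw s)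

-- A's for-loop with its early return, as structural recursion over the map's items
def pvLoopA (critLower volLower : String) : List (String × List String) → Bool
  | [] => false
  | (_, kws) :: rest =>
      if pvAnyKwIn volLower kws then
        if pvAnyKwIn critLower kws then true
        else pvLoopA critLower volLower rest
      else pvLoopA critLower volLower rest

def criterion_matches_volume_py (criterion_name : String) (volume_name : String) : Bool :=
  let criterionLower := PySem.Str.lower criterion_name
  let volumeLower := PySem.Str.lower volume_name
  pvLoopA criterionLower volumeLower pvKeywordMap

-- ===== PORT B =====
-- the flat inverted keyword -> category-bit list of Source B
def pvKwBits : List (String × Nat) :=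
  [("technical", 1), ("approach", 1), ("solution", 1),
   ("management", 2), ("staffing", 2), ("personnel", 2),
   ("past performance", 4), ("experience", 4), ("reference", 4),
   ("price", 8), ("cost", 8), ("pricing", 8)]

-- one step of the fingerprint loop: if kw in s: m |= bit
def pvMaskStep (s : String) (m : Nat) (p : String × Nat) : Nat :=
  if PySem.Str.isIn p.1 s then m ||| p.2 else m

-- _fingerprint(s): single pass over the flat list, OR-accumulating category bits
def pvFingerprint (s : String) : Nat :=
  pvKwBits.foldl (pvMaskStep (PySem.Str.lower s)) 0

def criterion_matches_volume_py_alt (criterion_name : String) (volume_name : String) : Bool :=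
  decide (pvFingerprint volume_name &&& pvFingerprint criterion_name ≠ 0)

-- ===== PRECONDITION & SPEC =====
def Spec_criterion_matches_volume_py (criterion_name : String) (volume_name : String) (out : Bool) : Prop := out = criterion_matches_volume_py_alt criterion_name volume_name
instance (criterion_name : String) (volume_name : String) (out : Bool) : Decidable (Spec_criterion_matches_volume_py criterion_name volume_name out) := by unfold Spec_criterion_matches_volume_py; infer_instance

-- ===== CLAIM =====
def Claim_equal_criterion_matches_volume_py : Prop := ∀ (criterion_name : String) (volume_name : String), Dom_criterion_matches_volume_py criterion_name volume_name → Spec_criterion_matches_volume_py criterion_name volume_name (criterion_matches_volume_py criterion_name volume_name)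

-- ===== LEMMAS AND PROOFS =====

-- folding one 3-keyword group of equal bit ORs in the bit iff any of the group's keywords occurs
theorem pvMask_group (s : String) (m bit : Nat) (k1 k2 k3 : String) :
    List.foldl (pvMaskStep s) m [(k1, bit), (k2, bit), (k3, bit)] =
    m ||| (if pvAnyKwIn s [k1, k2, k3] then bit else 0) := by
  cases h1 : PySem.Str.isIn k1 s <;> cases h2 : PySem.Str.isIn k2 s <;>
    cases h3 : PySem.Str.isIn k3 s <;>
    simp only [List.foldl, pvMaskStep, pvAnyKwIn, List.any_cons, List.any_nil,
               h1, h2, h3, Bool.false_or, Bool.or_false, Bool.true_or,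
               if_true] <;>
    simp [Nat.lor_assoc, Nat.or_self]

-- the fingerprint decomposed into the four per-category any-tests
theorem pvFingerprint_eq (s : String) :
    pvFingerprint s =
      ((((if pvAnyKwIn (PySem.Str.lower s) ["technical", "approach", "solution"] then 1 else 0) |||
        (if pvAnyKwIn (PySem.Str.lower s) ["management", "staffing", "personnel"] then 2 else 0)) |||
        (if pvAnyKwIn (PySem.Str.lower s) ["past performance", "experience", "reference"] then 4 else 0)) |||
        (if pvAnyKwIn (PySem.Str.lower s) ["price", "cost", "pricing"] then 8 else 0)) := by
  have h : pvKwBits =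
      [("technical", 1), ("approach", 1), ("solution", 1)] ++
      ([("management", 2), ("staffing", 2), ("personnel", 2)] ++
      ([("past performance", 4), ("experience", 4), ("reference", 4)] ++
       [("price", 8), ("cost", 8), ("pricing", 8)])) := rfl
  unfold pvFingerprint
  rw [h, List.foldl_append, List.foldl_append, List.foldl_append,
      pvMask_group, pvMask_group, pvMask_group, pvMask_group]
  simp [Nat.lor_assoc]

-- ===== VERDICT =====
theorem criterion_matches_volume_py_spec : Claim_equal_criterion_matches_volume_py := by
  intro c v _
  unfold Spec_criterion_matches_volume_py criterion_matches_volume_py criterion_matches_volume_py_alt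
  rw [pvFingerprint_eq, pvFingerprint_eq]
  cases h1 : pvAnyKwIn (PySem.Str.lower v) ["technical", "approach", "solution"] <;>
  cases h2 : pvAnyKwIn (PySem.Str.lower v) ["management", "staffing", "personnel"] <;>
  cases h3 : pvAnyKwIn (PySem.Str.lower v) ["past performance", "experience", "reference"] <;>
  cases h4 : pvAnyKwIn (PySem.Str.lower v) ["price", "cost", "pricing"] <;>
  cases h5 : pvAnyKwIn (PySem.Str.lower c) ["technical", "approach", "solution"] <;>
  cases h6 : pvAnyKwIn (PySem.Str.lower c) ["management", "staffing", "personnel"] <;>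
  cases h7 : pvAnyKwIn (PySem.Str.lower c) ["past performance", "experience", "reference"] <;>
  cases h8 : pvAnyKwIn (PySem.Str.lower c) ["price", "cost", "pricing"] <;>
  simp [pvLoopA, pvKeywordMap, h1, h2, h3, h4, h5, h6, h7, h8]
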